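-- pv_equiv track=rewrite | github.com/siavashvampire/python_trader | app/quotex/quotexapi/stable_api.py | get_both_asset_from_raw
-- ===== SOURCE A (Python) =====
-- def get_both_asset_from_raw(all_asset, asset):
--     asset_data = None
--     asset_data_otc = None
--
--     for i in all_asset:
--         if i[1] == asset:
--             asset_data = i
--         if i[1] == asset + "_otc":
--             asset_data_otc = i
--
--     return asset_data,asset_data_otc
-- ===== SOURCE B (Python) =====
-- def get_both_asset_from_raw(all_asset, asset):
--     def find_last(name):
--         for i in reversed(all_asset):
--             if i[1] == name:
--                 return i
--         return None
--     return find_last(asset), find_last(asset + "_otc")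
-- ===== Notes on version B (the rewrite author's own statement) =====
-- stated objective: alternative
-- what changed: Replaces the forward scan keeping two running last-match accumulators by two independent early-exit searches over the reversed list (first match in reverse = last match forward).
import Mathlib
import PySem

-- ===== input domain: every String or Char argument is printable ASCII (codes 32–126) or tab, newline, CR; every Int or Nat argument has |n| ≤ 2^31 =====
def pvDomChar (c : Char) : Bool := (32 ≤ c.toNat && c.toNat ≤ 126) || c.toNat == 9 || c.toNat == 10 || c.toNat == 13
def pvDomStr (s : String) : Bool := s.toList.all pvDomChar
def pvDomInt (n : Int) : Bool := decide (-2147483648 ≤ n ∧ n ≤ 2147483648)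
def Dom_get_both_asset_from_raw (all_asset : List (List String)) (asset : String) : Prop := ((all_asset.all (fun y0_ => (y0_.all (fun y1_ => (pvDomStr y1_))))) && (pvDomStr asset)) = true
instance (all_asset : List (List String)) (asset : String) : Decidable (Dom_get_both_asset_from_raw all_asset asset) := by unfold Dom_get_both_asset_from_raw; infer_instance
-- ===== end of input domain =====

-- B replaces A's forward scan with two accumulators by two early-exit searches over the reversed list; alternative decomposition, same cost.

-- ===== PORT A =====
def get_both_asset_from_raw (all_asset : List (List String)) (asset : String) : Option (List String) × Option (List String) :=
  all_asset.foldl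
    (fun (st : Option (List String) × Option (List String)) i =>
      let st1 := if PySem.List.pyGet? i 1 = some asset then (some i, st.2) else st
      if PySem.List.pyGet? i 1 = some (asset ++ "_otc") then (st1.1, some i) else st1)
    (none, none)

-- ===== PORT B =====
-- find_last: first row matching `name` when walking the reversed list (early exit).
def pvFindRow (l : List (List String)) (name : String) : Option (List String) :=
  match l with
  | [] => none
  | i :: rest => if PySem.List.pyGet? i 1 = some name then some i else pvFindRow rest name

def get_both_asset_from_raw_alt (all_asset : List (List String)) (asset : String) : Option (List String) × Option (List String) :=
  (pvFindRow all_asset.reverse asset, pvFindRow all_asset.reverse (asset ++ "_otc"))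

-- ===== PRECONDITION & SPEC =====
-- Pre_ excludes inputs containing a row of length < 2, on which Python A raises IndexError at i[1].
def Pre_get_both_asset_from_raw (all_asset : List (List String)) (asset : String) : Prop :=
  ∀ i ∈ all_asset, 1 < i.length
instance (all_asset : List (List String)) (asset : String) : Decidable (Pre_get_both_asset_from_raw all_asset asset) := by unfold Pre_get_both_asset_from_raw; infer_instance
def pvWitness_get_both_asset_from_raw : List (List String) × String := ([["x", "EURUSD"], ["y", "EURUSD_otc"]], "EURUSD")

def Spec_get_both_asset_from_raw (all_asset : List (List String)) (asset : String) (out : Option (List String) × Option (List String)) : Prop := out = get_both_asset_from_raw_alt all_asset asset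
instance (all_asset : List (List String)) (asset : String) (out : Option (List String) × Option (List String)) : Decidable (Spec_get_both_asset_from_raw all_asset asset out) := by unfold Spec_get_both_asset_from_raw; infer_instance

-- ===== CLAIM (what is proved, stated in full; the proofs are below) =====
def Claim_equal_get_both_asset_from_raw : Prop := ∀ (all_asset : List (List String)) (asset : String), Dom_get_both_asset_from_raw all_asset asset → Pre_get_both_asset_from_raw all_asset asset → Spec_get_both_asset_from_raw all_asset asset (get_both_asset_from_raw all_asset asset)

-- ===== LEMMAS AND PROOFS =====
-- Searching the reversed list splits over an appended last element.
theorem pvFindRow_append_single (xs : List (List String)) (i : List String) (name : String) :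
    pvFindRow (xs ++ [i]) name
      = (pvFindRow xs name).or (if PySem.List.pyGet? i 1 = some name then some i else none) := by
  induction xs with
  | nil => simp only [List.nil_append, pvFindRow, Option.none_or]
  | cons j rest ih =>
    simp only [List.cons_append, pvFindRow, ih]
    split <;> simp

-- Invariant of A's fold: each running accumulator equals the reversed-search result or'ed with its start value.
theorem gbafr_inv (asset : String) (l : List (List String))
    (st : Option (List String) × Option (List String)) :
    l.foldl
      (fun (st : Option (List String) × Option (List String)) i =>
        let st1 := if PySem.List.pyGet? i 1 = some asset then (some i, st.2) else st
        if PySem.List.pyGet? i 1 = some (asset ++ "_otc") then (st1.1, some i) else st1)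
      st
    = ((pvFindRow l.reverse asset).or st.1, (pvFindRow l.reverse (asset ++ "_otc")).or st.2) := by
  have hne : asset ≠ asset ++ "_otc" := fun h => by
    have hl := congrArg String.length h
    rw [String.length_append] at hl
    have h4 : ("_otc" : String).length = 4 := rfl
    omega
  induction l generalizing st with
  | nil => simp [pvFindRow]
  | cons i rest ih =>
    simp only [List.foldl_cons, ih, List.reverse_cons, pvFindRow_append_single, Option.or_assoc]
    congr 1
    · by_cases hA : PySem.List.pyGet? i 1 = some asset <;>
        by_cases hO : PySem.List.pyGet? i 1 = some (asset ++ "_otc") <;>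
        simp [hA, hO, hne]
    · by_cases hA : PySem.List.pyGet? i 1 = some asset <;>
        by_cases hO : PySem.List.pyGet? i 1 = some (asset ++ "_otc") <;>
        simp [hA, hO, hne]

-- ===== VERDICT (by name: the statement is the Claim_ definition above) =====
theorem get_both_asset_from_raw_spec : Claim_equal_get_both_asset_from_raw := by
  intro all_asset asset _ _
  unfold Spec_get_both_asset_from_raw get_both_asset_from_raw get_both_asset_from_raw_alt
  simp [gbafr_inv]
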